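-- pv_equiv track=rewrite | github.com/Blaxav/Challenges-algo | AOC2017/Antoine/16.py | part2
-- ===== SOURCE A (Python) =====
-- def spin(current_string: str, num: int):
--     return current_string[-num:] + current_string[:len(current_string)-num]
--
-- def exchange(current_string: str, positions: int):
--     return current_string[:positions[0]] + current_string[positions[1]] + current_string[positions[0] + 1:positions[1]] + current_string[positions[0]] + current_string[positions[1] + 1:]
--
-- def part2(current_string: str, scheme: list):
--     states = []
--     for it in range(1_000_000_000):
--         if current_string in states:
--             break
--         else:
--             states.append(current_string)
--
--         for count, instruction in enumerate(scheme):
--             if instruction.startswith('s'):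
--                 current_string = spin(current_string, int(instruction[1:]))
--             elif instruction.startswith('x'):
--                 positions = sorted([int(b) for b in instruction.replace('x', '').split('/')])
--                 current_string = exchange(current_string, positions)
--             elif instruction.startswith('p'):
--                 positions = sorted([current_string.find(b) for b in instruction.replace('p', '', 1).split('/')])
--                 current_string = exchange(current_string, positions)
--
--     return states[1_000_000_000 % it]
-- ===== SOURCE B (Python) =====
-- def part2(current_string: str, scheme: list):
--     # Compile each instruction once, find the cycle length by comparing with the
--     # starting string, then replay only 1e9 % L rounds (no orbit list kept).
--     ops = []
--     for ins in scheme: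
--         if ins.startswith('s'):
--             ops.append(('s', int(ins[1:])))
--         elif ins.startswith('x'):
--             a, b = sorted(int(v) for v in ins.replace('x', '').split('/'))
--             ops.append(('x', a, b))
--         elif ins.startswith('p'):
--             a, b = ins.replace('p', '', 1).split('/')
--             ops.append(('p', a, b))
--         else:
--             ops.append(None)
--
--     def one_round(s):
--         for op in ops:
--             if op is None:
--                 continue
--             if op[0] == 's':
--                 k = op[1]
--                 s = s[-k:] + s[:len(s) - k]
--             else:
--                 if op[0] == 'x':
--                     i, j = op[1], op[2]
--                 else:
--                     i, j = sorted((s.find(op[1]), s.find(op[2])))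
--                 s = s[:i] + s[j] + s[i + 1:j] + s[i] + s[j + 1:]
--         return s
--
--     original = current_string
--     cur = current_string
--     for L in range(1, 1_000_000_000):
--         cur = one_round(cur)
--         if cur == original:
--             break
--     cur = original
--     for _ in range(1_000_000_000 % L):
--         cur = one_round(cur)
--     return cur
-- ===== Notes on version B (the rewrite author's own statement) =====
-- stated objective: alternative
-- what changed: B compiles the scheme once and finds the cycle length by comparing each round's result with the starting string, then replays 1e9 % L rounds; A re-parses every instruction each round and keeps the whole orbit in a list that it scans for membership every round.
-- outside the precondition, e.g. on part2('ab', ['x0/1/1']): A returns 'ab', B raises ValueError; on part2('ab', ['s4']): A returns 'ab', B returns 'ab'; on part2('aba', ['pa/b']): A returns 'aba', B returns 'aba'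
import Mathlib
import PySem

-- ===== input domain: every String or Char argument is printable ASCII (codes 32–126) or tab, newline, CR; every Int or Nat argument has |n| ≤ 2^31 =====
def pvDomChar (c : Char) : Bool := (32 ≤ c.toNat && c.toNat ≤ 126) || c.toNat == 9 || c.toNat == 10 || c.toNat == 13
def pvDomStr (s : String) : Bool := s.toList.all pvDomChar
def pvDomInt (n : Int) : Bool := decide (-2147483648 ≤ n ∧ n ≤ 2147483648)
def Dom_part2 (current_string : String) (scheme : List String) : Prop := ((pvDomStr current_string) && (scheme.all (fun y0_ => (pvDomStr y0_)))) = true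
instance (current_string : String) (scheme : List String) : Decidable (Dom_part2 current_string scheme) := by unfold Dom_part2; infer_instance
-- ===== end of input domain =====

-- B compiles the dance once and finds the cycle length by comparing with the start,
-- then replays 1e9 % L rounds, instead of A's orbit list scanned for membership each round.

-- ===== PORT A =====

-- exact port of s.replace(old, '', 1) for a single-character old: drop the first occurrence
def pvReplaceOnce (cs : List Char) (c : Char) : List Char :=
  match cs with
  | [] => []
  | x :: xs => if x = c then xs else x :: pvReplaceOnce xs c

-- spin(current_string, num) = current_string[-num:] + current_string[:len(current_string)-num]
def pvSpin (cs : List Char) (num : Int) : List Char :=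
  PySem.Chars.slice cs (some (-num)) none ++
    PySem.Chars.slice cs none (some ((cs.length : Int) - num))

-- exchange(current_string, positions); the pyGetD defaults are taken only where the
-- Python raises IndexError, on inputs Pre_part2 excludes
def pvExchange (cs : List Char) (positions : List Int) : List Char :=
  let p0 := PySem.List.pyGetD positions 0 0
  let p1 := PySem.List.pyGetD positions 1 0
  PySem.Chars.slice cs none (some p0) ++ [PySem.List.pyGetD cs p1 ' '] ++
    PySem.Chars.slice cs (some (p0 + 1)) (some p1) ++ [PySem.List.pyGetD cs p0 ' '] ++
    PySem.Chars.slice cs (some (p1 + 1)) none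

-- the body of A's inner 'for count, instruction in enumerate(scheme)' loop (count is unused)
def pvStepA (cs : List Char) (ins : List Char) : List Char :=
  if PySem.Chars.startswith ins ['s'] then
    match PySem.Int.ofChars? (PySem.Chars.slice ins (some 1) none) with
    | some num => pvSpin cs num
    | none => cs            -- int() raises ValueError here: outside Pre_part2
  else if PySem.Chars.startswith ins ['x'] then
    match (PySem.Chars.splitOn (PySem.Chars.replace ins ['x'] []) ['/']).map PySem.Int.ofChars? with
    | [some a, some b] => pvExchange cs (PySem.List.sorted [a, b] (fun v => v) false)
    | _ => cs               -- int() raises, or a part count ≠ 2: outside Pre_part2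
  else if PySem.Chars.startswith ins ['p'] then
    match PySem.Chars.splitOn (pvReplaceOnce ins 'p') ['/'] with
    | [a, b] => pvExchange cs (PySem.List.sorted [PySem.Chars.find cs a, PySem.Chars.find cs b] (fun v => v) false)
    | _ => cs               -- a part count ≠ 2: outside Pre_part2
  else cs

-- A's outer 'for it in range(1_000_000_000)' loop with its break
def pvLoopA (sch : List (List Char)) (it : Nat) (states : List (List Char)) (cur : List Char) :
    List (List Char) × Nat :=
  if it < 1000000000 then
    if states.contains cur then (states, it)
    else pvLoopA sch (it + 1) (states ++ [cur]) (sch.foldl pvStepA cur)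
  else (states, it - 1)     -- range exhausted: Python leaves it = 999999999
termination_by 1000000000 - it

def part2 (current_string : String) (scheme : List String) : String :=
  let res := pvLoopA (scheme.map String.toList) 0 [] current_string.toList
  String.ofList (PySem.List.pyGetD res.1 ((1000000000 % res.2 : Nat) : Int) [])

-- ===== PORT B =====

inductive PvOp
  | nop
  | spn (num : Int)
  | exc (i j : Int)
  | par (a b : List Char)
deriving Repr, DecidableEq

-- Source B: compile one instruction once (the nop defaults are where Source B raises: outside Pre_part2)
def pvCompile (ins : List Char) : PvOp :=
  if PySem.Chars.startswith ins ['s'] then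
    match PySem.Int.ofChars? (PySem.Chars.slice ins (some 1) none) with
    | some num => PvOp.spn num
    | none => PvOp.nop
  else if PySem.Chars.startswith ins ['x'] then
    match (PySem.Chars.splitOn (PySem.Chars.replace ins ['x'] []) ['/']).map PySem.Int.ofChars? with
    | [some a, some b] =>
      match PySem.List.sorted [a, b] (fun v => v) false with
      | [i, j] => PvOp.exc i j
      | _ => PvOp.nop       -- unreachable: sorted keeps the length
    | _ => PvOp.nop
  else if PySem.Chars.startswith ins ['p'] then
    match PySem.Chars.splitOn (pvReplaceOnce ins 'p') ['/'] with
    | [a, b] => PvOp.par a b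
    | _ => PvOp.nop
  else PvOp.nop

-- Source B: one compiled op applied inside one_round (same slice expression as exchange/spin)
def pvApply (cs : List Char) (op : PvOp) : List Char :=
  match op with
  | .nop => cs
  | .spn k => pvSpin cs k
  | .exc i j => pvExchange cs [i, j]
  | .par a b => pvExchange cs (PySem.List.sorted [PySem.Chars.find cs a, PySem.Chars.find cs b] (fun v => v) false)

def pvRound (ops : List PvOp) (cs : List Char) : List Char := ops.foldl pvApply cs

-- Source B: 'for L in range(1, 1_000_000_000)' searching for the cycle length
def pvLoopB (ops : List PvOp) (orig : List Char) (L : Nat) (cur : List Char) : Nat :=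
  if L < 1000000000 then
    let cur' := pvRound ops cur
    if cur' = orig then L else pvLoopB ops orig (L + 1) cur'
  else 999999999            -- range exhausted: Python leaves L = 999999999
termination_by 1000000000 - L

-- Source B: 'for _ in range(1_000_000_000 % L)' replay loop
def pvReplay (ops : List PvOp) : Nat → List Char → List Char
  | 0, cur => cur
  | r + 1, cur => pvReplay ops r (pvRound ops cur)

def part2_alt (current_string : String) (scheme : List String) : String :=
  let ops := (scheme.map String.toList).map pvCompile
  let orig := current_string.toList
  let L := pvLoopB ops orig 1 orig
  String.ofList (pvReplay ops (1000000000 % L) orig)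

-- ===== PRECONDITION & SPEC =====

-- one instruction is a well-formed dance move on a string with the characters cs (or a no-op)
def pvWfIns (cs : List Char) (ins : List Char) : Bool :=
  if PySem.Chars.startswith ins ['s'] then
    match PySem.Int.ofChars? (PySem.Chars.slice ins (some 1) none) with
    | some k => decide (1 ≤ k ∧ k ≤ (cs.length : Int))
    | none => false
  else if PySem.Chars.startswith ins ['x'] then
    match (PySem.Chars.splitOn (PySem.Chars.replace ins ['x'] []) ['/']).map PySem.Int.ofChars? with
    | [some i, some j] => decide (0 ≤ i ∧ i < (cs.length : Int) ∧ 0 ≤ j ∧ j < (cs.length : Int) ∧ i ≠ j)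
    | _ => false
  else if PySem.Chars.startswith ins ['p'] then
    match ins with
    | 'p' :: rest =>
      match PySem.Chars.splitOn rest ['/'] with
      | [[a], [b]] => a != b && cs.contains a && cs.contains b && decide cs.Nodup
      | _ => false
    | _ => false
  else true

-- Pre_part2 keeps the inputs on which every instruction is a well-formed, in-range dance move
-- (or an inert non-s/x/p instruction, which A skips); it excludes malformed or out-of-range
-- moves — on most of those A raises ValueError/IndexError or scans all 10^9 rounds because the
-- round map stops being a bijection — and partner moves on strings with duplicate or missing
-- letters, where A's first-repeat bookkeeping is accidental.
def Pre_part2 (current_string : String) (scheme : List String) : Prop :=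
  scheme.all (fun ins => pvWfIns current_string.toList ins.toList) = true

instance (current_string : String) (scheme : List String) : Decidable (Pre_part2 current_string scheme) := by
  unfold Pre_part2; infer_instance

def pvWitness_part2 : String × List String := ("abcd", ["s2", "x0/3", "pa/c"])

def Spec_part2 (current_string : String) (scheme : List String) (out : String) : Prop :=
  out = part2_alt current_string scheme
instance (current_string : String) (scheme : List String) (out : String) : Decidable (Spec_part2 current_string scheme out) := by
  unfold Spec_part2; infer_instance

-- ===== CLAIM (what is proved, stated in full; the proofs are below) =====
def Claim_equal_part2 : Prop := ∀ (current_string : String) (scheme : List String), Dom_part2 current_string scheme → Pre_part2 current_string scheme → Spec_part2 current_string scheme (part2 current_string scheme)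

-- ===== LEMMAS AND PROOFS =====

theorem pv_sorted_pair (a b : Int) : ∃ u v, PySem.List.sorted [a, b] (fun v => v) false = [u, v] := by
  have h := PySem.List.length_sorted (xs := [a, b]) (key := fun v => v) (rev := false)
  rcases e : PySem.List.sorted [a, b] (fun v => v) false with _ | ⟨u, _ | ⟨v, _ | w⟩⟩ <;>
    rw [e] at h <;> simp at h
  exact ⟨u, v, rfl⟩

theorem pv_step_eq_apply (cs ins : List Char) : pvStepA cs ins = pvApply cs (pvCompile ins) := by
  unfold pvStepA pvCompile
  split_ifs with h1 h2 h3 <;> try rfl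
  · cases h : PySem.Int.ofChars? (PySem.Chars.slice ins (some 1) none) <;> simp [pvApply]
  · cases h : (PySem.Chars.splitOn (PySem.Chars.replace ins ['x'] []) ['/']).map PySem.Int.ofChars? with
    | nil => simp [pvApply]
    | cons hd tl =>
      match hd, tl with
      | some a, [some b] =>
        obtain ⟨u, v, huv⟩ := pv_sorted_pair a b
        simp [huv, pvApply]
      | none, tl => simp [pvApply]
      | some a, [] => simp [pvApply]
      | some a, none :: tl => simp [pvApply]
      | some a, some b :: c :: tl => simp [pvApply]
  · cases h : PySem.Chars.splitOn (pvReplaceOnce ins 'p') ['/'] with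
    | nil => simp [pvApply]
    | cons hd tl =>
      match tl with
      | [] => simp [pvApply]
      | [b] => simp [pvApply]
      | b :: c :: tl => simp [pvApply]

theorem pv_round_map_eq (sch : List (List Char)) (cs : List Char) :
    pvRound (sch.map pvCompile) cs = sch.foldl pvStepA cs := by
  unfold pvRound
  rw [List.foldl_map]
  have : (fun (c : List Char) (i : List Char) => pvApply c (pvCompile i)) = pvStepA := by
    funext c i; rw [pv_step_eq_apply]
  rw [this]

theorem pv_iter_perm (f : List Char → List Char) (s0 : List Char)
    (hperm : ∀ u, u.Perm s0 → (f u).Perm s0) : ∀ n, (f^[n] s0).Perm s0 := by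
  intro n; induction n with
  | zero => simp
  | succ n ih => rw [Function.iterate_succ_apply']; exact hperm _ ih

theorem pv_iter_cancel (f : List Char → List Char) (s0 : List Char)
    (hperm : ∀ u, u.Perm s0 → (f u).Perm s0)
    (hinj : ∀ u v, u.Perm s0 → v.Perm s0 → f u = f v → u = v) :
    ∀ m k, f^[m + k] s0 = f^[m] s0 → f^[k] s0 = s0 := by
  intro m; induction m with
  | zero => intro k h; simpa using h
  | succ m ih =>
    intro k h
    apply ih
    have e : m + 1 + k = m + k + 1 := by omega
    rw [e, Function.iterate_succ_apply', Function.iterate_succ_apply'] at h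
    exact hinj _ _ (pv_iter_perm f s0 hperm _) (pv_iter_perm f s0 hperm _) h

theorem pv_no_repeat (f : List Char → List Char) (s0 : List Char)
    (hperm : ∀ u, u.Perm s0 → (f u).Perm s0)
    (hinj : ∀ u v, u.Perm s0 → v.Perm s0 → f u = f v → u = v)
    (it m : Nat) (hm : m < it) (hno : ∀ t, 1 ≤ t → t ≤ it → f^[t] s0 ≠ s0) :
    f^[it] s0 ≠ f^[m] s0 := by
  intro h
  have : f^[m + (it - m)] s0 = f^[m] s0 := by
    have e : m + (it - m) = it := by omega
    rw [e]; exact h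
  exact hno (it - m) (by omega) (by omega) (pv_iter_cancel f s0 hperm hinj m (it - m) this)

theorem pv_not_mem_states (f : List Char → List Char) (s0 : List Char)
    (hperm : ∀ u, u.Perm s0 → (f u).Perm s0)
    (hinj : ∀ u v, u.Perm s0 → v.Perm s0 → f u = f v → u = v)
    (it : Nat) (hno : ∀ t, 1 ≤ t → t ≤ it → f^[t] s0 ≠ s0) :
    ((List.range it).map (fun m => f^[m] s0)).contains (f^[it] s0) = false := by
  rw [Bool.eq_false_iff]
  intro hc
  rw [List.contains_iff_exists_mem_beq] at hc
  obtain ⟨x, hx, hbeq⟩ := hc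
  obtain ⟨m, hm, rfl⟩ := List.mem_map.mp hx
  have hmr := List.mem_range.mp hm
  have heq : f^[it] s0 = f^[m] s0 := by
    have := (beq_iff_eq).mp hbeq
    exact this
  exact pv_no_repeat f s0 hperm hinj it m hmr hno heq

theorem pv_loopA_run (sch : List (List Char)) (f : List Char → List Char) (s0 : List Char)
    (hF : ∀ cur, sch.foldl pvStepA cur = f cur)
    (hperm : ∀ u, u.Perm s0 → (f u).Perm s0)
    (hinj : ∀ u v, u.Perm s0 → v.Perm s0 → f u = f v → u = v)
    (p : Nat) (hp1 : 1 ≤ p) (hple : p ≤ 999999999)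
    (hpp : f^[p] s0 = s0)
    (hmin : ∀ t, 1 ≤ t → t < p → f^[t] s0 ≠ s0) :
    ∀ d it, p - it = d → it ≤ p →
      pvLoopA sch it ((List.range it).map (fun m => f^[m] s0)) (f^[it] s0)
        = ((List.range p).map (fun m => f^[m] s0), p) := by
  intro d
  induction d with
  | zero =>
    intro it hd hle
    have hit : it = p := by omega
    subst hit
    rw [pvLoopA]
    have hlt : it < 1000000000 := by omega
    rw [if_pos hlt]
    have hmem : ((List.range it).map (fun m => f^[m] s0)).contains (f^[it] s0) = true := by
      rw [List.contains_iff_exists_mem_beq]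
      refine ⟨f^[0] s0, ?_, ?_⟩
      · exact List.mem_map.mpr ⟨0, List.mem_range.mpr (by omega), rfl⟩
      · simp [hpp]
    rw [hmem, if_pos rfl]
  | succ d ih =>
    intro it hd hle
    have hit : it < p := by omega
    rw [pvLoopA]
    have hlt : it < 1000000000 := by omega
    rw [if_pos hlt]
    have hmem : ((List.range it).map (fun m => f^[m] s0)).contains (f^[it] s0) = false :=
      pv_not_mem_states f s0 hperm hinj it (fun t h1 h2 => hmin t h1 (by omega))
    rw [hmem]
    simp only [Bool.false_eq_true, if_false]
    have e1 : (List.range it).map (fun m => f^[m] s0) ++ [f^[it] s0]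
        = (List.range (it + 1)).map (fun m => f^[m] s0) := by
      rw [List.range_succ, List.map_append]; rfl
    have e2 : sch.foldl pvStepA (f^[it] s0) = f^[it + 1] s0 := by
      rw [hF]; exact (Function.iterate_succ_apply' f it s0).symm
    rw [e1, e2]
    exact ih (it + 1) (by omega) (by omega)

theorem pv_loopA_run_none (sch : List (List Char)) (f : List Char → List Char) (s0 : List Char)
    (hF : ∀ cur, sch.foldl pvStepA cur = f cur)
    (hperm : ∀ u, u.Perm s0 → (f u).Perm s0)
    (hinj : ∀ u v, u.Perm s0 → v.Perm s0 → f u = f v → u = v)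
    (hnone : ∀ t, 1 ≤ t → t ≤ 999999999 → f^[t] s0 ≠ s0) :
    ∀ d it, 1000000000 - it = d → it ≤ 1000000000 →
      pvLoopA sch it ((List.range it).map (fun m => f^[m] s0)) (f^[it] s0)
        = ((List.range 1000000000).map (fun m => f^[m] s0), 999999999) := by
  intro d
  induction d with
  | zero =>
    intro it hd hle
    have hit : it = 1000000000 := by omega
    subst hit
    rw [pvLoopA, if_neg (by omega)]
  | succ d ih =>
    intro it hd hle
    have hit : it < 1000000000 := by omega
    rw [pvLoopA, if_pos hit]
    have hmem : ((List.range it).map (fun m => f^[m] s0)).contains (f^[it] s0) = false :=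
      pv_not_mem_states f s0 hperm hinj it (fun t h1 h2 => hnone t h1 (by omega))
    rw [hmem]
    simp only [Bool.false_eq_true, if_false]
    have e1 : (List.range it).map (fun m => f^[m] s0) ++ [f^[it] s0]
        = (List.range (it + 1)).map (fun m => f^[m] s0) := by
      rw [List.range_succ, List.map_append]; rfl
    have e2 : sch.foldl pvStepA (f^[it] s0) = f^[it + 1] s0 := by
      rw [hF]; exact (Function.iterate_succ_apply' f it s0).symm
    rw [e1, e2]
    exact ih (it + 1) (by omega) (by omega)

theorem pv_loopB_run (ops : List PvOp) (s0 : List Char) (p : Nat)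
    (hple : p ≤ 999999999)
    (hpp : (pvRound ops)^[p] s0 = s0)
    (hmin : ∀ t, 1 ≤ t → t < p → (pvRound ops)^[t] s0 ≠ s0) :
    ∀ d L, p - L = d → 1 ≤ L → L ≤ p →
      pvLoopB ops s0 L ((pvRound ops)^[L - 1] s0) = p := by
  intro d
  induction d with
  | zero =>
    intro L hd h1 hle
    have hL : L = p := by omega
    subst hL
    rw [pvLoopB, if_pos (by omega)]
    have e : pvRound ops ((pvRound ops)^[L - 1] s0) = (pvRound ops)^[L] s0 := by
      conv_rhs => rw [show L = (L - 1) + 1 by omega, Function.iterate_succ_apply']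
    simp [e, hpp]
  | succ d ih =>
    intro L hd h1 hle
    have hL : L < p := by omega
    rw [pvLoopB, if_pos (by omega)]
    have e : pvRound ops ((pvRound ops)^[L - 1] s0) = (pvRound ops)^[L] s0 := by
      conv_rhs => rw [show L = (L - 1) + 1 by omega, Function.iterate_succ_apply']
    simp only [e]
    rw [if_neg (hmin L h1 hL)]
    have := ih (L + 1) (by omega) (by omega) (by omega)
    simpa using this

theorem pv_loopB_run_none (ops : List PvOp) (s0 : List Char)
    (hnone : ∀ t, 1 ≤ t → t ≤ 999999999 → (pvRound ops)^[t] s0 ≠ s0) :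
    ∀ d L, 1000000000 - L = d → 1 ≤ L → L ≤ 1000000000 →
      pvLoopB ops s0 L ((pvRound ops)^[L - 1] s0) = 999999999 := by
  intro d
  induction d with
  | zero =>
    intro L hd h1 hle
    have hL : L = 1000000000 := by omega
    subst hL
    rw [pvLoopB, if_neg (by omega)]
  | succ d ih =>
    intro L hd h1 hle
    have hL : L < 1000000000 := by omega
    rw [pvLoopB, if_pos hL]
    have e : pvRound ops ((pvRound ops)^[L - 1] s0) = (pvRound ops)^[L] s0 := by
      conv_rhs => rw [show L = (L - 1) + 1 by omega, Function.iterate_succ_apply']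
    simp only [e]
    rw [if_neg (hnone L h1 (by omega))]
    have := ih (L + 1) (by omega) (by omega) (by omega)
    simpa using this

theorem pv_replay_iter (ops : List PvOp) : ∀ r cur, pvReplay ops r cur = (pvRound ops)^[r] cur := by
  intro r
  induction r with
  | zero => intro cur; rfl
  | succ r ih => intro cur; rw [pvReplay, ih, ← Function.iterate_succ_apply]

theorem pv_spin_eq_rotate (cs : List Char) (num : Int) (h1 : 1 ≤ num) (h2 : num ≤ (cs.length : Int)) :
    pvSpin cs num = cs.rotate (cs.length - num.toNat) := by
  unfold pvSpin
  lift num to ℕ using (by omega : (0:Int) ≤ num) with k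
  have hk1 : 0 < k := by omega
  have hkle : k ≤ cs.length := by omega
  rw [PySem.Chars.slice_eq_listSlice, PySem.Chars.slice_eq_listSlice]
  rw [PySem.List.slice_from_neg_natCast cs k hk1]
  have he : ((cs.length : Int) - (k : Int)) = ((cs.length - k : Nat) : Int) := by omega
  rw [he, PySem.List.slice_to_natCast]
  rw [List.rotate_eq_drop_append_take (by omega)]
  simp

theorem pv_exchange_nat (cs : List Char) (i j : Nat) (_hij : i < j) (_hj : j < cs.length) :
    pvExchange cs [(i : Int), (j : Int)] =
      cs.take i ++ [cs.getD j ' '] ++ ((cs.drop (i+1)).take (j - (i+1))) ++ [cs.getD i ' '] ++ cs.drop (j+1) := by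
  unfold pvExchange
  have hp0 : PySem.List.pyGetD [(i : Int), (j : Int)] 0 0 = (i : Int) := by
    simp [PySem.List.pyGetD, PySem.List.pyGet?, PySem.List.pyIdx?]
  have hp1 : PySem.List.pyGetD [(i : Int), (j : Int)] 1 0 = (j : Int) := by
    simp [PySem.List.pyGetD, PySem.List.pyGet?, PySem.List.pyIdx?]
  simp only [hp0, hp1, PySem.Chars.slice_eq_listSlice]
  rw [PySem.List.slice_to_natCast]
  have e1 : ((i : Int) + 1) = ((i + 1 : Nat) : Int) := by push_cast; ring
  have e2 : ((j : Int) + 1) = ((j + 1 : Nat) : Int) := by push_cast; ring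
  rw [e1, e2, PySem.List.slice_natCast, PySem.List.slice_from_natCast]
  have g1 : PySem.List.pyGetD cs (j : Int) ' ' = cs.getD j ' ' := by
    simp [PySem.List.pyGetD_natCast]
  have g2 : PySem.List.pyGetD cs (i : Int) ' ' = cs.getD i ' ' := by
    simp [PySem.List.pyGetD_natCast]
  rw [g1, g2]

theorem pv_getD_shape_mid (A : List Char) (z : Char) (rest : List Char) :
    (A ++ z :: rest).getD A.length ' ' = z := by
  rw [List.getD_eq_getElem?_getD, List.getElem?_append_right (le_refl _)]
  simp

theorem pv_decomp (cs : List Char) (i j : Nat) (hij : i < j) (hj : j < cs.length) :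
    cs = cs.take i ++ cs.getD i ' ' :: (((cs.drop (i+1)).take (j - (i+1))) ++ cs.getD j ' ' :: cs.drop (j+1)) := by
  have hi : i < cs.length := by omega
  have d1 : cs.drop i = cs.getD i ' ' :: cs.drop (i+1) := by
    rw [List.getD_eq_getElem?_getD, List.getElem?_eq_getElem hi]
    exact List.drop_eq_getElem_cons hi
  have harith : (i+1) + (j - (i+1)) = j := by omega
  have d2 : cs.drop (i+1) = ((cs.drop (i+1)).take (j - (i+1))) ++ cs.drop j := by
    conv_lhs => rw [← List.take_append_drop (j - (i+1)) (cs.drop (i+1))]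
    rw [List.drop_drop, harith]
  have d3 : cs.drop j = cs.getD j ' ' :: cs.drop (j+1) := by
    rw [List.getD_eq_getElem?_getD, List.getElem?_eq_getElem hj]
    exact List.drop_eq_getElem_cons hj
  calc cs = cs.take i ++ cs.drop i := (List.take_append_drop i cs).symm
    _ = cs.take i ++ (cs.getD i ' ' :: cs.drop (i+1)) := by rw [d1]
    _ = cs.take i ++ (cs.getD i ' ' :: (((cs.drop (i+1)).take (j - (i+1))) ++ cs.drop j)) := by
        conv_lhs => rw [d2]
    _ = _ := by rw [d3]

theorem pv_swap_shape (A B C : List Char) (x y : Char) :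
    pvExchange (A ++ x :: (B ++ y :: C)) [((A.length : Nat) : Int), ((A.length + B.length + 1 : Nat) : Int)]
      = A ++ y :: (B ++ x :: C) := by
  have hlen : (A ++ x :: (B ++ y :: C)).length = A.length + B.length + C.length + 2 := by
    simp [List.length_append]; omega
  have hij : A.length < A.length + B.length + 1 := by omega
  have hj : A.length + B.length + 1 < (A ++ x :: (B ++ y :: C)).length := by omega
  rw [pv_exchange_nat _ A.length (A.length + B.length + 1) hij hj]
  have t1 : (A ++ x :: (B ++ y :: C)).take A.length = A := by
    conv_lhs => rw [show (A ++ x :: (B ++ y :: C)) = A ++ (x :: (B ++ y :: C)) from rfl]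
    exact List.take_left
  have hasc1 : A ++ x :: (B ++ y :: C) = (A ++ x :: B) ++ (y :: C) := by simp
  have t2 : (A ++ x :: (B ++ y :: C)).getD (A.length + B.length + 1) ' ' = y := by
    rw [hasc1]
    have : A.length + B.length + 1 = (A ++ x :: B).length := by simp; omega
    rw [this]
    exact pv_getD_shape_mid _ y C
  have hasc2 : A ++ x :: (B ++ y :: C) = (A ++ [x]) ++ (B ++ y :: C) := by simp
  have t3 : (A ++ x :: (B ++ y :: C)).drop (A.length + 1) = B ++ y :: C := by
    rw [hasc2]
    have : A.length + 1 = (A ++ [x]).length := by simp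
    rw [this]
    exact List.drop_left
  have t4 : (B ++ y :: C).take (A.length + B.length + 1 - (A.length + 1)) = B := by
    have : A.length + B.length + 1 - (A.length + 1) = B.length := by omega
    rw [this]
    exact List.take_left
  have t5 : (A ++ x :: (B ++ y :: C)).getD A.length ' ' = x := pv_getD_shape_mid A x _
  have hasc3 : A ++ x :: (B ++ y :: C) = (A ++ x :: (B ++ [y])) ++ C := by simp
  have t6 : (A ++ x :: (B ++ y :: C)).drop (A.length + B.length + 1 + 1) = C := by
    rw [hasc3]
    have : A.length + B.length + 1 + 1 = (A ++ x :: (B ++ [y])).length := by simp; omega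
    rw [this]
    exact List.drop_left
  rw [t1, t2, t3, t4, t5, t6]
  simp

theorem pv_swap_perm (A B C : List Char) (x y : Char) :
    (A ++ y :: (B ++ x :: C)).Perm (A ++ x :: (B ++ y :: C)) := by
  apply List.Perm.append_left
  have h1 : (y :: (B ++ x :: C)).Perm (y :: x :: (B ++ C)) := List.Perm.cons y List.perm_middle
  have h2 : (y :: x :: (B ++ C)).Perm (x :: y :: (B ++ C)) := List.Perm.swap x y (B ++ C)
  have h3 : (x :: y :: (B ++ C)).Perm (x :: (B ++ y :: C)) := List.Perm.cons x List.perm_middle.symm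
  exact (h1.trans h2).trans h3

theorem pv_exchange_swap (cs : List Char) (i j : Nat) (hij : i < j) (hj : j < cs.length) :
    ∃ A B C x y, cs = A ++ x :: (B ++ y :: C) ∧ A.length = i ∧ B.length = j - i - 1 ∧
      x = cs.getD i ' ' ∧ y = cs.getD j ' ' ∧
      pvExchange cs [(i : Int), (j : Int)] = A ++ y :: (B ++ x :: C) := by
  refine ⟨cs.take i, (cs.drop (i+1)).take (j - (i+1)), cs.drop (j+1), cs.getD i ' ', cs.getD j ' ',
    pv_decomp cs i j hij hj, ?_, ?_, rfl, rfl, ?_⟩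
  · simp [List.length_take]; omega
  · simp [List.length_take, List.length_drop]; omega
  · have hA : (cs.take i).length = i := by simp [List.length_take]; omega
    have hB : ((cs.drop (i+1)).take (j - (i+1))).length = j - i - 1 := by
      simp [List.length_take, List.length_drop]; omega
    have hsh := pv_swap_shape (cs.take i) ((cs.drop (i+1)).take (j - (i+1))) (cs.drop (j+1))
      (cs.getD i ' ') (cs.getD j ' ')
    rw [hA, hB] at hsh
    have he : (j - i - 1) + 1 = j - i := by omega
    have he2 : i + (j - i - 1) + 1 = j := by omega
    rw [he2] at hsh
    rw [← pv_decomp cs i j hij hj] at hsh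
    exact hsh

theorem pv_exchange_perm (cs : List Char) (i j : Nat) (hij : i < j) (hj : j < cs.length) :
    (pvExchange cs [(i : Int), (j : Int)]).Perm cs := by
  obtain ⟨A, B, C, x, y, hcs, _, _, _, _, hex⟩ := pv_exchange_swap cs i j hij hj
  rw [hex]
  conv_rhs => rw [hcs]
  exact pv_swap_perm A B C x y

theorem pv_exchange_invol (cs : List Char) (i j : Nat) (hij : i < j) (hj : j < cs.length) :
    pvExchange (pvExchange cs [(i : Int), (j : Int)]) [(i : Int), (j : Int)] = cs := by
  obtain ⟨A, B, C, x, y, hcs, hA, hB, _, _, hex⟩ := pv_exchange_swap cs i j hij hj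
  rw [hex]
  have h2 := pv_swap_shape A B C y x
  rw [hA] at h2
  have hlen2 : i + B.length + 1 = j := by omega
  rw [hlen2] at h2
  rw [h2, ← hcs]

theorem pv_prefix_singleton (c : Char) (l : List Char) : [c] <+: l ↔ l[0]? = some c := by
  constructor
  · rintro ⟨t, rfl⟩; simp
  · intro h
    cases l with
    | nil => simp at h
    | cons a t =>
      simp at h
      exact ⟨t, by simp [h]⟩

theorem pv_find_at (u : List Char) (c : Char) (i : Nat) (hi : u[i]? = some c)
    (hmin : ∀ m, m < i → u[m]? ≠ some c) : PySem.Chars.find u [c] = (i : Int) := by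
  obtain ⟨hilen, hieq⟩ := List.getElem?_eq_some_iff.mp hi
  have hpre : [c] <+: u.drop i := by
    rw [pv_prefix_singleton]
    rw [List.getElem?_drop]
    simpa using hi
  have hnn : 0 ≤ PySem.Chars.find u [c] := by
    rw [PySem.Chars.find_nonneg_iff]
    obtain ⟨t, ht⟩ := hpre
    exact ⟨u.take i, t, by rw [List.append_assoc, ht, List.take_append_drop]⟩
  obtain ⟨hp, hminf⟩ := PySem.Chars.find_spec hnn
  have ht0 : (PySem.Chars.find u [c]).toNat = i := by
    by_contra hne
    rcases Nat.lt_or_ge (PySem.Chars.find u [c]).toNat i with hlt | hge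
    · have := (pv_prefix_singleton c _).mp hp
      rw [List.getElem?_drop] at this
      exact hmin _ (by omega) (by simpa using this)
    · have : i < (PySem.Chars.find u [c]).toNat := by omega
      exact hminf i this hpre
  omega

theorem pv_find_nodup (u : List Char) (c : Char) (hnd : u.Nodup) (i : Nat) (hi : u[i]? = some c) :
    PySem.Chars.find u [c] = (i : Int) := by
  apply pv_find_at u c i hi
  intro m hm hmc
  obtain ⟨hilen, hieq⟩ := List.getElem?_eq_some_iff.mp hi
  obtain ⟨hmlen, hmeq⟩ := List.getElem?_eq_some_iff.mp hmc
  have : m = i := (hnd.getElem_inj_iff).mp (by rw [hieq, hmeq])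
  omega

theorem pv_sorted_pair_lt (a b : Int) (h : a < b) :
    PySem.List.sorted [a, b] (fun v => v) false = [a, b] :=
  PySem.List.sorted_eq_of_perm_of_pairwise_lt _ _ _ (List.Perm.refl _) (by simp [h])

theorem pv_sorted_pair_gt (a b : Int) (h : b < a) :
    PySem.List.sorted [a, b] (fun v => v) false = [b, a] :=
  PySem.List.sorted_eq_of_perm_of_pairwise_lt _ _ _ (List.Perm.swap a b []) (by simp [h])

theorem pv_shape_getElem_lo (A rest : List Char) (z : Char) :
    (A ++ z :: rest)[A.length]? = some z := by
  rw [List.getElem?_append_right (le_refl _)]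
  simp

theorem pv_partner_ordered (u : List Char) (clo chi : Char) (lo hi : Nat) (hnd : u.Nodup)
    (hlh : lo < hi) (hhi : hi < u.length)
    (hlo? : u[lo]? = some clo) (hhi? : u[hi]? = some chi) :
    (pvExchange u [(lo : Int), (hi : Int)]).Perm u ∧
    PySem.Chars.find (pvExchange u [(lo : Int), (hi : Int)]) [clo] = (hi : Int) ∧
    PySem.Chars.find (pvExchange u [(lo : Int), (hi : Int)]) [chi] = (lo : Int) ∧
    pvExchange (pvExchange u [(lo : Int), (hi : Int)]) [(lo : Int), (hi : Int)] = u := by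
  obtain ⟨A, B, C, x, y, hcs, hA, hB, hx, hy, hex⟩ := pv_exchange_swap u lo hi hlh hhi
  have hperm : (pvExchange u [(lo : Int), (hi : Int)]).Perm u := pv_exchange_perm u lo hi hlh hhi
  have hwnd : (pvExchange u [(lo : Int), (hi : Int)]).Nodup := (hperm.nodup_iff).mpr hnd
  have hxc : x = clo := by
    have : u.getD lo ' ' = clo := by rw [List.getD_eq_getElem?_getD, hlo?]; rfl
    rw [hx, this]
  have hyc : y = chi := by
    have : u.getD hi ' ' = chi := by rw [List.getD_eq_getElem?_getD, hhi?]; rfl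
    rw [hy, this]
  have hjlen : A.length + B.length + 1 = hi := by omega
  have hwlo : (pvExchange u [(lo : Int), (hi : Int)])[lo]? = some chi := by
    rw [hex, ← hA, ← hyc]
    exact pv_shape_getElem_lo A _ y
  have hwhi : (pvExchange u [(lo : Int), (hi : Int)])[hi]? = some clo := by
    rw [hex]
    have hasc : A ++ y :: (B ++ x :: C) = (A ++ y :: B) ++ x :: C := by simp
    rw [hasc]
    have : hi = (A ++ y :: B).length := by simp; omega
    rw [this, ← hxc]
    exact pv_shape_getElem_lo _ C x
  refine ⟨hperm, pv_find_nodup _ clo hwnd hi hwhi, pv_find_nodup _ chi hwnd lo hwlo, ?_⟩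
  exact pv_exchange_invol u lo hi hlh hhi

theorem pv_exchange_pair_facts (s0 u : List Char) (hu : u.Perm s0) (lo hi : Nat)
    (hlh : lo < hi) (hhi : hi < s0.length) :
    (pvExchange u [(lo : Int), (hi : Int)]).Perm u ∧
    ∀ v, v.Perm s0 → pvExchange u [(lo : Int), (hi : Int)] = pvExchange v [(lo : Int), (hi : Int)] → u = v := by
  have hu' : hi < u.length := by rw [hu.length_eq]; exact hhi
  refine ⟨pv_exchange_perm u lo hi hlh hu', ?_⟩
  intro v hv heq
  have hv' : hi < v.length := by rw [hv.length_eq]; exact hhi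
  have h1 := pv_exchange_invol u lo hi hlh hu'
  rw [← h1, heq, pv_exchange_invol v lo hi hlh hv']

theorem pv_partner_invol (u : List Char) (ca cb : Char) (hnd : u.Nodup) (hne : ca ≠ cb)
    (ha : ca ∈ u) (hb : cb ∈ u) :
    (pvExchange u (PySem.List.sorted [PySem.Chars.find u [ca], PySem.Chars.find u [cb]] (fun v => v) false)).Perm u ∧
    pvExchange
      (pvExchange u (PySem.List.sorted [PySem.Chars.find u [ca], PySem.Chars.find u [cb]] (fun v => v) false))
      (PySem.List.sorted
        [PySem.Chars.find (pvExchange u (PySem.List.sorted [PySem.Chars.find u [ca], PySem.Chars.find u [cb]] (fun v => v) false)) [ca],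
         PySem.Chars.find (pvExchange u (PySem.List.sorted [PySem.Chars.find u [ca], PySem.Chars.find u [cb]] (fun v => v) false)) [cb]]
        (fun v => v) false) = u := by
  obtain ⟨i, hilt, hieq⟩ := List.getElem_of_mem ha
  obtain ⟨j, hjlt, hjeq⟩ := List.getElem_of_mem hb
  have hij : i ≠ j := by
    intro h
    subst h
    exact hne (hieq.symm.trans hjeq)
  have hfi : PySem.Chars.find u [ca] = (i : Int) :=
    pv_find_nodup u ca hnd i (List.getElem?_eq_some_iff.mpr ⟨hilt, hieq⟩)
  have hfj : PySem.Chars.find u [cb] = (j : Int) :=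
    pv_find_nodup u cb hnd j (List.getElem?_eq_some_iff.mpr ⟨hjlt, hjeq⟩)
  rcases Nat.lt_or_ge i j with hlt | hge
  · -- ca sits at the lower index
    have hsort : PySem.List.sorted [PySem.Chars.find u [ca], PySem.Chars.find u [cb]] (fun v => v) false
        = [(i : Int), (j : Int)] := by
      rw [hfi, hfj]
      exact pv_sorted_pair_lt _ _ (by exact_mod_cast hlt)
    obtain ⟨hperm, hfa, hfb, hinv⟩ := pv_partner_ordered u ca cb i j hnd hlt hjlt
      (List.getElem?_eq_some_iff.mpr ⟨hilt, hieq⟩) (List.getElem?_eq_some_iff.mpr ⟨hjlt, hjeq⟩)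
    rw [hsort]
    refine ⟨hperm, ?_⟩
    rw [hfa, hfb, pv_sorted_pair_gt _ _ (by exact_mod_cast hlt)]
    exact hinv
  · have hlt : j < i := by omega
    have hsort : PySem.List.sorted [PySem.Chars.find u [ca], PySem.Chars.find u [cb]] (fun v => v) false
        = [(j : Int), (i : Int)] := by
      rw [hfi, hfj]
      exact pv_sorted_pair_gt _ _ (by exact_mod_cast hlt)
    obtain ⟨hperm, hfb, hfa, hinv⟩ := pv_partner_ordered u cb ca j i hnd hlt hilt
      (List.getElem?_eq_some_iff.mpr ⟨hjlt, hjeq⟩) (List.getElem?_eq_some_iff.mpr ⟨hilt, hieq⟩)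
    rw [hsort]
    refine ⟨hperm, ?_⟩
    rw [hfa, hfb, pv_sorted_pair_lt _ _ (by exact_mod_cast hlt)]
    exact hinv

theorem pv_step_wf (s0 u ins : List Char) (hwf : pvWfIns s0 ins = true) (hu : u.Perm s0) :
    (pvStepA u ins).Perm u ∧
    ∀ v, v.Perm s0 → pvStepA u ins = pvStepA v ins → u = v := by
  unfold pvWfIns at hwf
  unfold pvStepA
  by_cases hs : PySem.Chars.startswith ins ['s'] = true
  · simp only [hs, if_true] at hwf ⊢
    cases hof : PySem.Int.ofChars? (PySem.Chars.slice ins (some 1) none) with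
    | none => rw [hof] at hwf; exact absurd hwf (by simp)
    | some k =>
      rw [hof] at hwf
      try dsimp only at hwf ⊢
      simp only [decide_eq_true_eq] at hwf
      obtain ⟨hk1, hk2⟩ := hwf
      have hul : (u.length : Int) = (s0.length : Int) := by rw [hu.length_eq]
      constructor
      · rw [pv_spin_eq_rotate u k hk1 (by omega)]
        exact List.rotate_perm u _
      · intro v hv heq
        have hvl : v.length = u.length := by rw [hv.length_eq, hu.length_eq]
        rw [pv_spin_eq_rotate u k hk1 (by omega),
            pv_spin_eq_rotate v k hk1 (by rw [hv.length_eq]; omega), hvl] at heq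
        exact List.rotate_injective _ heq
  · simp only [Bool.not_eq_true] at hs
    simp only [hs, Bool.false_eq_true, if_false] at hwf ⊢
    by_cases hx : PySem.Chars.startswith ins ['x'] = true
    · simp only [hx, if_true] at hwf ⊢
      split at hwf
      · rename_i a b heq
        simp only [decide_eq_true_eq] at hwf
        obtain ⟨ha0, haml, hb0, hbl, hab⟩ := hwf
        have hcast_a : ((a.toNat : Nat) : Int) = a := Int.toNat_of_nonneg ha0
        have hcast_b : ((b.toNat : Nat) : Int) = b := Int.toNat_of_nonneg hb0
        rcases Int.lt_or_lt_of_ne hab with hlt | hlt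
        · have hsort : PySem.List.sorted [a, b] (fun v => v) false
              = [((a.toNat : Nat) : Int), ((b.toNat : Nat) : Int)] := by
            rw [hcast_a, hcast_b]; exact pv_sorted_pair_lt a b hlt
          rw [hsort]
          exact pv_exchange_pair_facts s0 u hu a.toNat b.toNat (by omega) (by omega)
        · have hsort : PySem.List.sorted [a, b] (fun v => v) false
              = [((b.toNat : Nat) : Int), ((a.toNat : Nat) : Int)] := by
            rw [hcast_a, hcast_b]; exact pv_sorted_pair_gt a b hlt
          rw [hsort]
          exact pv_exchange_pair_facts s0 u hu b.toNat a.toNat (by omega) (by omega)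
      · exact absurd hwf (by simp)
    · simp only [Bool.not_eq_true] at hx
      simp only [hx, Bool.false_eq_true, if_false] at hwf ⊢
      by_cases hp : PySem.Chars.startswith ins ['p'] = true
      · simp only [hp, if_true] at hwf ⊢
        cases ins with
        | nil => exact absurd hp (by decide)
        | cons c rest =>
          have hc : 'p' = c := by
            obtain ⟨t, ht⟩ := (PySem.Chars.startswith_iff _ _).mp hp
            have ht' : 'p' :: t = c :: rest := ht
            injection ht'
          subst hc
          have hro : pvReplaceOnce ('p' :: rest) 'p' = rest := by simp [pvReplaceOnce]
          rw [hro]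
          split at hwf
          · rename_i ins' rest' heqo
            injection heqo with heqo1 heqo2
            subst heqo2
            split at hwf
            · rename_i a b heqi
              rw [heqi]
              try dsimp only
              simp at hwf
              obtain ⟨⟨⟨hne, hain⟩, hbin⟩, hnd0⟩ := hwf
              have hundup : u.Nodup := (hu.nodup_iff).mpr hnd0
              have hau : a ∈ u := hu.mem_iff.mpr hain
              have hbu : b ∈ u := hu.mem_iff.mpr hbin
              refine ⟨(pv_partner_invol u a b hundup hne hau hbu).1, ?_⟩
              intro v hv heqv
              have hU := (pv_partner_invol u a b hundup hne hau hbu).2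
              have hV := (pv_partner_invol v a b ((hv.nodup_iff).mpr hnd0) hne
                (hv.mem_iff.mpr hain) (hv.mem_iff.mpr hbin)).2
              rw [← hU, heqv, hV]
            · exact absurd hwf (by simp)
          · exact absurd hwf (by simp)
      · simp only [Bool.not_eq_true] at hp
        simp only [hp, Bool.false_eq_true, if_false]
        exact ⟨List.Perm.refl u, fun v hv heq => heq⟩

theorem pv_fold_perm (s0 : List Char) (sch : List (List Char))
    (hwf : ∀ ins ∈ sch, pvWfIns s0 ins = true) :
    ∀ u, u.Perm s0 → (sch.foldl pvStepA u).Perm s0 := by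
  induction sch with
  | nil => intro u hu; simpa using hu
  | cons i t ih =>
    intro u hu
    rw [List.foldl_cons]
    exact ih (fun x hx => hwf x (List.mem_cons_of_mem i hx)) _
      (((pv_step_wf s0 u i (hwf i (by simp)) hu).1).trans hu)

theorem pv_fold_inj (s0 : List Char) (sch : List (List Char))
    (hwf : ∀ ins ∈ sch, pvWfIns s0 ins = true) :
    ∀ u v, u.Perm s0 → v.Perm s0 → sch.foldl pvStepA u = sch.foldl pvStepA v → u = v := by
  induction sch with
  | nil => intro u v _ _ h; simpa using h
  | cons i t ih =>
    intro u v hu hv h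
    rw [List.foldl_cons, List.foldl_cons] at h
    have h1 := ih (fun x hx => hwf x (List.mem_cons_of_mem i hx)) _ _
      (((pv_step_wf s0 u i (hwf i (by simp)) hu).1).trans hu)
      (((pv_step_wf s0 v i (hwf i (by simp)) hv).1).trans hv) h
    exact (pv_step_wf s0 u i (hwf i (by simp)) hu).2 v hv h1

theorem part2_spec' (current_string : String) (scheme : List String)
    (hpre : Pre_part2 current_string scheme) :
    part2 current_string scheme = part2_alt current_string scheme := by
  unfold Pre_part2 at hpre
  unfold part2 part2_alt
  set s0 := current_string.toList with hs0
  set sch := scheme.map String.toList with hsch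
  have hwf : ∀ ins ∈ sch, pvWfIns s0 ins = true := by
    intro ins hins
    rw [hsch] at hins
    obtain ⟨str, hstr, rfl⟩ := List.mem_map.mp hins
    exact List.all_eq_true.mp hpre str hstr
  set F : List Char → List Char := fun cs => sch.foldl pvStepA cs with hF
  have hFs : ∀ cur, sch.foldl pvStepA cur = F cur := fun _ => rfl
  have hperm : ∀ u, u.Perm s0 → (F u).Perm s0 := fun u hu => pv_fold_perm s0 sch hwf u hu
  have hinj : ∀ u v, u.Perm s0 → v.Perm s0 → F u = F v → u = v :=
    fun u v hu hv h => pv_fold_inj s0 sch hwf u v hu hv h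
  have hround : pvRound (sch.map pvCompile) = F := funext (fun cs => pv_round_map_eq sch cs)
  by_cases hex : ∃ t, 1 ≤ t ∧ t ≤ 999999999 ∧ F^[t] s0 = s0
  · set p := Nat.find hex with hpdef
    obtain ⟨hp1, hple, hpp⟩ := Nat.find_spec hex
    have hmin : ∀ t, 1 ≤ t → t < p → F^[t] s0 ≠ s0 :=
      fun t h1 h2 hne => Nat.find_min hex h2 ⟨h1, by omega, hne⟩
    have hA := pv_loopA_run sch F s0 hFs hperm hinj p hp1 hple hpp hmin p 0 (by omega) (by omega)
    simp only [List.range_zero, List.map_nil, Function.iterate_zero_apply] at hA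
    have hklt : 1000000000 % p < p := Nat.mod_lt _ (by omega)
    have hget : PySem.List.pyGetD ((List.range p).map (fun m => F^[m] s0))
        (((1000000000 % p : Nat) : Int)) [] = F^[1000000000 % p] s0 := by
      rw [PySem.List.pyGetD_natCast, List.getD_eq_getElem?_getD, List.getElem?_map,
        List.getElem?_range hklt]
      rfl
    have hBL : pvLoopB (sch.map pvCompile) s0 1 s0 = p := by
      have h0 : s0 = (pvRound (sch.map pvCompile))^[1 - 1] s0 := by simp
      rw [h0]
      exact pv_loopB_run (sch.map pvCompile) s0 p hple
        (by rw [hround]; exact hpp) (by rw [hround]; exact hmin) (p - 1) 1 rfl (by omega) (by omega)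
    rw [hA]; dsimp only; rw [hBL, pv_replay_iter, hround, hget]
  · have hnone : ∀ t, 1 ≤ t → t ≤ 999999999 → F^[t] s0 ≠ s0 := by
      intro t h1 h2 hne
      exact hex ⟨t, h1, h2, hne⟩
    have hA := pv_loopA_run_none sch F s0 hFs hperm hinj hnone 1000000000 0 (by omega) (by omega)
    simp only [List.range_zero, List.map_nil, Function.iterate_zero_apply] at hA
    have hmod : (1000000000 % 999999999 : Nat) = 1 := by norm_num
    have hget : PySem.List.pyGetD ((List.range 1000000000).map (fun m => F^[m] s0))
        (((1000000000 % 999999999 : Nat) : Int)) [] = F^[1] s0 := by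
      rw [hmod, PySem.List.pyGetD_natCast, List.getD_eq_getElem?_getD, List.getElem?_map,
        List.getElem?_range (by norm_num : (1:Nat) < 1000000000)]
      rfl
    have hBL : pvLoopB (sch.map pvCompile) s0 1 s0 = 999999999 := by
      have h0 : s0 = (pvRound (sch.map pvCompile))^[1 - 1] s0 := by simp
      rw [h0]
      exact pv_loopB_run_none (sch.map pvCompile) s0
        (by rw [hround]; exact hnone) 999999999 1 rfl (by omega) (by omega)
    rw [hA]; dsimp only; rw [hBL, pv_replay_iter, hround, hget, hmod]

-- ===== VERDICT (by name: the statement is the Claim_ definition above) =====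
theorem part2_spec : Claim_equal_part2 := by
  intro current_string scheme _hdom hpre
  show part2 current_string scheme = part2_alt current_string scheme
  exact part2_spec' current_string scheme hpre
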